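-- pv_equiv track=rewrite | github.com/VivianePons/zeta_areaseq | areaseq_zeta.py | bounce
-- ===== SOURCE A (Python) =====
-- def bounce_seq(seq):
--     b = [0]
--     for v in seq[1:]:
--         if b[-1]+1 <= v:
--             b.append(b[-1]+1)
--         else:
--             b.append(0)
--     return b
--
-- def bounce(seq):
--     bseq = bounce_seq(seq)
--     n = len(bseq)
--     b = 0
--     for i in range(1,len(bseq)):
--         if bseq[i] == 0:
--             b+= n - (i+1) + 1
--     return b
-- ===== SOURCE B (Python) =====
-- def bounce(seq):
--     # Staircase view: the bounce path returns to 0 exactly at the first index j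
--     # after the previous return where seq[j] falls below the staircase 1,2,3,...
--     # started there; each return at j contributes n - j.  No bounce counter
--     # sequence is ever computed.
--     n = len(seq)
--     total = 0
--     start = 0
--     while True:
--         k = next((k for k in range(1, n - start) if seq[start + k] < k), None)
--         if k is None:
--             return total
--         start += k
--         total += n - start
-- ===== Notes on version B (the rewrite author's own statement) =====
-- stated objective: alternative
-- what changed: B never computes the bounce counter sequence: it uses the staircase characterisation (the bounce path returns to 0 at the first index after the previous return where seq falls below the staircase 1,2,3,... started there) and repeatedly searches for that first break, adding n - break_position per segment.
import Mathlib
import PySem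

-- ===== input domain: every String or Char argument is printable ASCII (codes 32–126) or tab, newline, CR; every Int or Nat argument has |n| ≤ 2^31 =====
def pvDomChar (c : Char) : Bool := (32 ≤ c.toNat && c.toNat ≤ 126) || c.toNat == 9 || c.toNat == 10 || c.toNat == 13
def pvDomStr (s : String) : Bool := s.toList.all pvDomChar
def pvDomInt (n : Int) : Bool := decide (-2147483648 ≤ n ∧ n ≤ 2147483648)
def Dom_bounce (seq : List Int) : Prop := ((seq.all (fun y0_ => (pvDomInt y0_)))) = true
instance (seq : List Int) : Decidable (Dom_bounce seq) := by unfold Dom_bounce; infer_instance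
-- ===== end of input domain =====

-- B replaces A's build-the-bounce-sequence-then-scan-it by repeated search for the
-- first index where seq falls below the staircase started at the previous return to 0.

-- ===== PORT A =====
-- b[-1] on the (always nonempty) accumulator is PySem.List.pyGetD b (-1) 0 (exact: b never empty here)
def bounce_seq (seq : List Int) : List Int :=
  (PySem.List.slice seq (some 1) none).foldl
    (fun b v =>
      if PySem.List.pyGetD b (-1) 0 + 1 ≤ v then b ++ [PySem.List.pyGetD b (-1) 0 + 1]
      else b ++ [0]) [0]

-- bseq[i] for i in range(1, len(bseq)) is always in range, so pyGetD is exact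
def bounce (seq : List Int) : Int :=
  let bseq := bounce_seq seq
  let n : Int := bseq.length
  (PySem.List.pyRange 1 bseq.length 1).foldl
    (fun b i => if PySem.List.pyGetD bseq i 0 = 0 then b + (n - (i + 1) + 1) else b) 0

-- ===== PORT B =====
-- next((k for k in range(1, n - start) if seq[start + k] < k), None):
-- scans seq[start+1:], pairing element p with k = p - start
def bFind : List Int → Nat → Option Nat
  | [], _ => none
  | v :: m, k => if v < (k : Int) then some k else bFind m (k + 1)

-- needed for termination of bounceAltGo
theorem bFind_bounds (l : List Int) (k j : Nat) (h : bFind l k = some j) :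
    k ≤ j ∧ j < k + l.length := by
  induction l generalizing k with
  | nil => simp [bFind] at h
  | cons v m ih =>
    simp only [bFind, List.length_cons] at h ⊢
    split at h
    · cases h
      omega
    · have := ih (k + 1) h
      omega

def bounceAltGo (seq : List Int) (n : Int) (start : Nat) (total : Int) : Int :=
  match h : bFind (seq.drop (start + 1)) 1 with
  | none => total
  | some k => bounceAltGo seq n (start + k) (total + (n - ((start + k : Nat) : Int)))
termination_by seq.length - start
decreasing_by
  have hb := bFind_bounds _ _ _ h
  have hl := List.length_drop (l := seq) (i := start + 1)
  omega

def bounce_alt (seq : List Int) : Int := bounceAltGo seq seq.length 0 0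

-- ===== PRECONDITION & SPEC =====
def Spec_bounce (seq : List Int) (out : Int) : Prop := out = bounce_alt seq
instance (seq : List Int) (out : Int) : Decidable (Spec_bounce seq out) := by unfold Spec_bounce; infer_instance

-- ===== CLAIM (what is proved, stated in full; the proofs are below) =====
def Claim_equal_bounce : Prop := ∀ (seq : List Int), Dom_bounce seq → Spec_bounce seq (bounce seq)

-- ===== LEMMAS AND PROOFS =====

-- the one-step update of A's bounce_seq loop
def pvStep (p v : Int) : Int := if p + 1 ≤ v then p + 1 else 0

-- A's list-building loop is a scanl
theorem bounce_seq_build (l : List Int) (acc : List Int) (p : Int) :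
    l.foldl (fun b v =>
      if PySem.List.pyGetD b (-1) 0 + 1 ≤ v then b ++ [PySem.List.pyGetD b (-1) 0 + 1]
      else b ++ [0]) (acc ++ [p]) = acc ++ List.scanl pvStep p l := by
  induction l generalizing acc p with
  | nil => simp
  | cons v l ih =>
    simp only [List.foldl_cons, PySem.List.pyGetD_neg_one_append_singleton, List.scanl_cons]
    by_cases h : p + 1 ≤ v
    · rw [if_pos h]
      have := ih (acc ++ [p]) (p + 1)
      simpa [pvStep, h] using this
    · rw [if_neg h]
      have := ih (acc ++ [p]) 0
      simpa [pvStep, h] using this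

-- direct recursion computing A's summation loop over a list of bounce values
def pvSumGo (n i total : Int) : List Int → Int
  | [] => total
  | z :: zs => pvSumGo n (i + 1) (if z = 0 then total + (n - i) else total) zs

-- A's index-fold over pyRange equals the direct recursion
theorem sumRange (zs : List Int) (pre : List Int) (n total : Int) :
    (PySem.List.pyRange pre.length ((pre ++ zs).length) 1).foldl
      (fun b i => if PySem.List.pyGetD (pre ++ zs) i 0 = 0 then b + (n - (i + 1) + 1) else b) total
    = pvSumGo n pre.length total zs := by
  induction zs generalizing pre total with
  | nil => simp [pvSumGo, PySem.List.pyRange_one_eq_nil]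
  | cons z zs ih =>
    have hlen : (pre.length : Int) < ((pre ++ z :: zs).length : Int) := by
      simp
    rw [PySem.List.pyRange_one_cons hlen, List.foldl_cons]
    have hget : PySem.List.pyGetD (pre ++ z :: zs) (pre.length : Int) 0 = z := by
      rw [PySem.List.pyGetD_natCast]
      simp
    rw [hget]
    have h2 : pre ++ z :: zs = (pre ++ [z]) ++ zs := by simp
    have ih' := ih (pre ++ [z]) (if z = 0 then total + (n - (pre.length + 1) + 1) else total)
    have hcast : ((pre ++ [z]).length : Int) = (pre.length : Int) + 1 := by simp
    rw [hcast] at ih'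
    rw [h2, ih']
    simp only [pvSumGo]
    congr 1
    split_ifs <;> ring

-- within one run: A's summation over the scanl started at height k-1 is computed
-- by the first break that bFind finds, then restarts at height 0
theorem run_lemma (m : List Int) (k : Nat) (hk : 1 ≤ k) (n a total : Int) :
    pvSumGo n a total (List.scanl pvStep ((k : Int) - 1) m).tail
    = match bFind m k with
      | none => total
      | some j =>
          pvSumGo n (a + ((j : Int) - (k : Int)) + 1)
            (total + (n - (a + ((j : Int) - (k : Int)))))
            (List.scanl pvStep 0 (m.drop (j - k + 1))).tail := by
  induction m generalizing k a total with
  | nil => simp [pvSumGo, bFind]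
  | cons v m ih =>
    simp only [List.scanl_cons, List.tail_cons, bFind]
    by_cases hv : v < (k : Int)
    · rw [if_pos hv]
      have hstep : pvStep ((k : Int) - 1) v = 0 := by
        simp only [pvStep]; rw [if_neg (by omega)]
      rw [hstep]
      have hhead : List.scanl pvStep 0 m = 0 :: (List.scanl pvStep 0 m).tail := by
        cases m <;> simp [List.scanl_cons]
      rw [hhead]
      simp only [pvSumGo]
      have hd : (v :: m).drop (k - k + 1) = m := by simp
      rw [hd]
      have e1 : a + ((k : Int) - (k : Int)) + 1 = a + 1 := by ring
      have e2 : total + (n - (a + ((k : Int) - (k : Int)))) = total + (n - a) := by ring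
      rw [e1, e2]
      norm_num
    · rw [if_neg hv]
      have hstep : pvStep ((k : Int) - 1) v = (k : Int) := by
        simp only [pvStep]; rw [if_pos (by omega)]; ring
      rw [hstep]
      have hhead : List.scanl pvStep (k : Int) m
          = (k : Int) :: (List.scanl pvStep (k : Int) m).tail := by
        cases m <;> simp [List.scanl_cons]
      rw [hhead]
      have hkne : ((k : Int)) ≠ 0 := by
        have : (1 : Int) ≤ (k : Int) := by exact_mod_cast hk
        omega
      simp only [pvSumGo, if_neg hkne]
      have ihx := ih (k + 1) (by omega) (a + 1) total
      have hc : ((k + 1 : Nat) : Int) - 1 = (k : Int) := by push_cast; ring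
      rw [hc] at ihx
      rw [ihx]
      cases hb : bFind m (k + 1) with
      | none => rfl
      | some j =>
        have hbd := bFind_bounds m (k + 1) j hb
        simp only []
        have hd : (v :: m).drop (j - k + 1) = m.drop (j - (k + 1) + 1) := by
          have h1 : j - k + 1 = (j - (k + 1) + 1) + 1 := by omega
          rw [h1, List.drop_succ_cons]
        rw [hd]
        have hc1 : a + 1 + ((j : Int) - ((k + 1 : Nat) : Int)) + 1
            = a + ((j : Int) - (k : Int)) + 1 := by push_cast; ring
        have hc2 : total + (n - (a + 1 + ((j : Int) - ((k + 1 : Nat) : Int))))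
            = total + (n - (a + ((j : Int) - (k : Int)))) := by push_cast; ring
        rw [hc1, hc2]

-- run_lemma specialised to a fresh run (height 0, counter 1)
theorem run_lemma1 (m : List Int) (n a total : Int) :
    pvSumGo n a total (List.scanl pvStep 0 m).tail
    = match bFind m 1 with
      | none => total
      | some j =>
          pvSumGo n (a + (j : Int)) (total + (n - (a + (j : Int) - 1)))
            (List.scanl pvStep 0 (m.drop j)).tail := by
  have h := run_lemma m 1 le_rfl n a total
  have h0 : ((1 : Nat) : Int) - 1 = 0 := by norm_num
  rw [h0] at h
  rw [h]
  cases hb : bFind m 1 with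
  | none => rfl
  | some j =>
    have hbd := bFind_bounds m 1 j hb
    simp only []
    have hd : j - 1 + 1 = j := by omega
    rw [hd]
    have e1 : a + ((j : Int) - ((1 : Nat) : Int)) + 1 = a + (j : Int) := by push_cast; ring
    have e2 : total + (n - (a + ((j : Int) - ((1 : Nat) : Int))))
        = total + (n - (a + (j : Int) - 1)) := by push_cast; ring
    rw [e1, e2]

-- bounceAltGo's one-step unfolding with a plain (non-dependent) match
theorem bounceAltGo_eq (seq : List Int) (n : Int) (start : Nat) (total : Int) :
    bounceAltGo seq n start total
    = match bFind (seq.drop (start + 1)) 1 with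
      | none => total
      | some k => bounceAltGo seq n (start + k) (total + (n - ((start + k : Nat) : Int))) := by
  rw [bounceAltGo]
  split
  · next h => rw [h]
  · next k h => rw [h]

-- the outer segment loop: A's remaining summation equals B's bounceAltGo
-- (induction on the length of the part of seq not yet consumed)
theorem outer_aux (seq : List Int) (meas : Nat) :
    ∀ (start : Nat) (total : Int), seq.length - start = meas →
    pvSumGo (seq.length : Int) ((start : Int) + 1) total
      (List.scanl pvStep 0 (seq.tail.drop start)).tail
    = bounceAltGo seq (seq.length : Int) start total := by
  induction meas using Nat.strong_induction_on with
  | _ meas ih =>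
    intro start total hm
    have hdd : seq.drop (start + 1) = seq.tail.drop start := by
      rw [← List.drop_one, List.drop_drop, Nat.add_comm]
    rw [bounceAltGo_eq, hdd, run_lemma1]
    cases hb : bFind (seq.tail.drop start) 1 with
    | none => rfl
    | some j =>
      have hbd := bFind_bounds (seq.tail.drop start) 1 j hb
      have hlen : (seq.tail.drop start).length = seq.length - 1 - start := by
        rw [List.length_drop, List.length_tail]
      rw [hlen] at hbd
      simp only []
      have hd : (seq.tail.drop start).drop j = seq.tail.drop (start + j) := by
        rw [List.drop_drop, Nat.add_comm]
      rw [hd]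
      have e1 : (start : Int) + 1 + (j : Int) = ((start + j : Nat) : Int) + 1 := by
        push_cast; ring
      have e2 : total + ((seq.length : Int) - ((start : Int) + 1 + (j : Int) - 1))
          = total + ((seq.length : Int) - ((start + j : Nat) : Int)) := by
        push_cast; ring
      rw [e2, e1]
      exact ih (seq.length - (start + j)) (by omega) (start + j) _ rfl

theorem bounce_eq_sum (seq : List Int) :
    bounce seq = pvSumGo (seq.length : Int) 1 0 (List.scanl pvStep 0 seq.tail).tail := by
  unfold bounce bounce_seq
  rw [PySem.List.slice_from_one]
  cases seq with
  | nil => simp [pvSumGo, PySem.List.pyRange_one_eq_nil]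
  | cons x rest =>
    simp only [List.tail_cons]
    have hb := bounce_seq_build rest ([] : List Int) 0
    simp only [List.nil_append] at hb
    rw [hb]
    have hscan : List.scanl pvStep 0 rest = [0] ++ (List.scanl pvStep 0 rest).tail := by
      cases rest <;> simp [List.scanl]
    have hlen : ((List.scanl pvStep 0 rest).length : Int) = ((x :: rest).length : Int) := by
      rw [List.length_scanl]; simp
    conv_lhs => rw [hscan]
    have hr := sumRange ((List.scanl pvStep 0 rest).tail) [0]
        ((x :: rest).length : Int) 0
    simp only [List.length_cons, List.length_nil] at hr ⊢
    rw [← hscan] at hr ⊢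
    rw [hlen] at hr
    simpa using hr

-- ===== VERDICT (by name: the statement is the Claim_ definition above) =====
theorem bounce_spec : Claim_equal_bounce := by
  intro seq _
  unfold Spec_bounce bounce_alt
  rw [bounce_eq_sum seq]
  have h := outer_aux seq seq.length 0 0 (by omega)
  simpa using h
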